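-- pv_equiv track=rewrite | github.com/Bhumika2006-hue/GFG-Code-by-Bhumi | Difficulty: Hard/Number of distinct words with K maximum contiguous vowels/number-of-distinct-words-with-k-maximum-contiguous-vowels.py | kvowelwords
-- ===== SOURCE A (Python) =====
-- def kvowelwords(N, K):
--     MOD = 1000000007
--
--     # dp[i][j] = number of words of length i ending with j vowels
--     dp = [[0] * (K + 1) for _ in range(N + 1)]
--
--     # Base case: Word of length 0
--     dp[0][0] = 1
--
--     for i in range(1, N + 1):
--         # Calculate the sum of all valid words of length i-1
--         # to handle the consonant case (resetting the vowel count)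
--         sum_prev = sum(dp[i-1]) % MOD
--
--         for j in range(K + 1):
--             if j == 0:
--                 # Current char is a consonant (21 options)
--                 # Can follow any word of length i-1
--                 dp[i][j] = (sum_prev * 21) % MOD
--             else:
--                 # Current char is a vowel (5 options)
--                 # Must follow a word ending in j-1 vowels
--                 dp[i][j] = (dp[i-1][j-1] * 5) % MOD
--
--     # The answer is the sum of all words of length N
--     # ending in 0, 1, ..., K vowels
--     return sum(dp[N]) % MOD
-- ===== SOURCE B (Python) =====
-- def kvowelwords(N, K):
--     MOD = 1000000007
--     # Scalar linear recurrence on S(i) = total count for length i: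
--     # S(i) = 26*S(i-1) - 5*dp[i-1][K], and the column dp[m][K] collapses to
--     # 0 (m<K), 5^K (m==K), or 5^K*21*S(m-K-1) (m>K).
--     p5 = pow(5, K, MOD)
--     S = [1]
--     for i in range(1, N + 1):
--         m = i - 1
--         if m < K:
--             tail = 0
--         elif m == K:
--             tail = p5
--         else:
--             tail = p5 * 21 % MOD * S[m - K - 1] % MOD
--         S.append((26 * S[-1] - 5 * tail) % MOD)
--     return S[N]
-- ===== Notes on version B (the rewrite author's own statement) =====
-- stated objective: faster
-- what changed: Replaces the (N+1)x(K+1) DP table with a scalar linear recurrence S(i)=26*S(i-1)-5*dp[i-1][K], where the K-th column collapses to a closed form in earlier S values, giving one value per step.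
import Mathlib
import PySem

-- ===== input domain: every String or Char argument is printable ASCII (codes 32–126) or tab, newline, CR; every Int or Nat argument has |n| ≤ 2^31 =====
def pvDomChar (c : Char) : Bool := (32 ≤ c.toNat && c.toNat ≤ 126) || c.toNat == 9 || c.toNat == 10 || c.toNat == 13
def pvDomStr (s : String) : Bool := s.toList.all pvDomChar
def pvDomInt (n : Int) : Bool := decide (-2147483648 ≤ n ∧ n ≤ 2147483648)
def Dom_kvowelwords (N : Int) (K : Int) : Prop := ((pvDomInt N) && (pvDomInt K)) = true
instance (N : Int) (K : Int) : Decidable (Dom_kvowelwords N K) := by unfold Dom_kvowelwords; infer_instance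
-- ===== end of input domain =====

-- B replaces A's (N+1)x(K+1) DP table by the scalar recurrence S(i) = 26*S(i-1) - 5*dp[i-1][K],
-- whose tail column collapses to a closed form in earlier S values (objective: faster).

-- ===== PORT A =====
-- one DP row of A's inner loop: j = 0 consonant case, j ≥ 1 vowel case
def pvRowA (M : Int) (k : Nat) (prev : List Int) : List Int :=
  let sp := PySem.Int.mod prev.sum M
  (List.range (k+1)).map (fun j =>
    if j = 0 then PySem.Int.mod (sp * 21) M
    else PySem.Int.mod (prev.getD (j-1) 0 * 5) M)

-- dp rows: row 0 is [0,…,0] with dp[0][0] set to 1, row i+1 from row i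
def pvDpA (M : Int) (k : Nat) : Nat → List Int
  | 0 => (List.replicate (k+1) (0:Int)).set 0 1
  | i+1 => pvRowA M k (pvDpA M k i)

def kvowelwords (N : Int) (K : Int) : Int :=
  PySem.Int.mod (pvDpA 1000000007 K.toNat N.toNat).sum 1000000007

-- ===== PORT B =====
-- B's tail term: the value dp[m][K] in closed form over the S list
def pvTailB (M p5 : Int) (k : Nat) (S : List Int) (m : Nat) : Int :=
  if m < k then 0
  else if m = k then p5
  else PySem.Int.mod (PySem.Int.mod (p5 * 21) M * S.getD (m - k - 1) 0) M

-- one iteration of B's loop: append (26*S[-1] - 5*tail) % MOD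
def pvStepB (M p5 : Int) (k : Nat) (S : List Int) (m : Nat) : List Int :=
  S ++ [PySem.Int.mod (26 * S.getLastD 0 - 5 * pvTailB M p5 k S m) M]

def kvowelwords_alt (N : Int) (K : Int) : Int :=
  ((List.range N.toNat).foldl
      (pvStepB 1000000007 (PySem.Int.powMod 5 K.toNat 1000000007) K.toNat) [1]).getD N.toNat 0

-- ===== PRECONDITION & SPEC =====
-- A raises IndexError when N < 0 (dp is empty) or K < 0 (rows are empty); those inputs are excluded.
def Pre_kvowelwords (N : Int) (K : Int) : Prop := 0 ≤ N ∧ 0 ≤ K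
instance (N : Int) (K : Int) : Decidable (Pre_kvowelwords N K) := by unfold Pre_kvowelwords; infer_instance
def pvWitness_kvowelwords : Int × Int := (3, 1)

def Spec_kvowelwords (N : Int) (K : Int) (out : Int) : Prop := out = kvowelwords_alt N K
instance (N : Int) (K : Int) (out : Int) : Decidable (Spec_kvowelwords N K out) := by unfold Spec_kvowelwords; infer_instance

-- ===== CLAIM (what is proved, stated in full; the proofs are below) =====
def Claim_equal_kvowelwords : Prop := ∀ (N : Int) (K : Int), Dom_kvowelwords N K → Pre_kvowelwords N K → Spec_kvowelwords N K (kvowelwords N K)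

-- ===== LEMMAS AND PROOFS =====

-- S(i) of the analysis: A's row sum mod M
def pvS (k i : Nat) : Int := PySem.Int.mod (pvDpA 1000000007 k i).sum 1000000007

theorem pvmod (a : Int) : PySem.Int.mod a 1000000007 = a % 1000000007 :=
  PySem.Int.mod_eq_emod_of_pos (by norm_num)

theorem pvLenA (M : Int) (k : Nat) (i : Nat) : (pvDpA M k i).length = k + 1 := by
  induction i with
  | zero => simp [pvDpA]
  | succ i ih => simp [pvDpA, pvRowA]

theorem pvRow0 (k : Nat) : (List.replicate (k+1) (0:Int)).set 0 1 = 1 :: List.replicate k 0 := by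
  simp [List.replicate_succ]

-- l.sum as a sum of getD over range (length)
theorem pvSumGetD (l : List Int) : l.sum = ((List.range l.length).map (fun j => l.getD j 0)).sum := by
  induction l with
  | nil => simp
  | cons a t ih =>
      simp [List.range_succ_eq_map, List.map_map, Function.comp_def, ih]

-- congruence of sums of mapped lists
theorem pvSumCong (M : Int) (f g : Nat → Int) (l : List Nat)
    (h : ∀ j ∈ l, f j ≡ g j [ZMOD M]) :
    (l.map f).sum ≡ (l.map g).sum [ZMOD M] := by
  induction l with
  | nil => rfl
  | cons a t ih =>
      simp only [List.map_cons, List.sum_cons]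
      exact (h a (by simp)).add (ih (fun j hj => h j (by simp [hj])))

theorem pvModSelf (a : Int) : a % 1000000007 ≡ a [ZMOD 1000000007] :=
  Int.emod_emod_of_dvd a dvd_rfl

theorem pvDp0_zero (k : Nat) : (pvDpA 1000000007 k 0).getD 0 0 = 1 := by
  simp [pvDpA, pvRow0]

theorem pvDp0_succ (k : Nat) (m : Nat) :
    (pvDpA 1000000007 k (m+1)).getD 0 0
      = ((pvDpA 1000000007 k m).sum % 1000000007 * 21) % 1000000007 := by
  simp only [pvDpA, pvRowA, pvmod]
  rw [PySem.List.getD_map_range _ _ _ _ (by omega)]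
  simp

theorem pvDpSucc_getD (k : Nat) (m j : Nat) (hj : j < k) :
    (pvDpA 1000000007 k (m+1)).getD (j+1) 0
      = ((pvDpA 1000000007 k m).getD j 0 * 5) % 1000000007 := by
  simp only [pvDpA, pvRowA, pvmod]
  rw [PySem.List.getD_map_range _ _ _ _ (by omega)]
  simp

-- the column: dp[m][j] ≡ 5^j * dp[m-j][0]  (0 when m < j)
theorem pvCol (k : Nat) (j : Nat) (hj : j ≤ k) : ∀ m : Nat,
    (pvDpA 1000000007 k m).getD j 0
      ≡ (if m < j then 0 else 5^j * (pvDpA 1000000007 k (m-j)).getD 0 0) [ZMOD 1000000007] := by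
  induction j with
  | zero => intro m; simp
  | succ j ih =>
      intro m
      cases m with
      | zero =>
          have h0 : (pvDpA 1000000007 k 0).getD (j+1) 0 = 0 := by
            simp [pvDpA, pvRow0, List.getD]
          rw [h0]
          simp
      | succ m =>
          rw [pvDpSucc_getD k m j (by omega)]
          calc ((pvDpA 1000000007 k m).getD j 0 * 5) % 1000000007
              ≡ (pvDpA 1000000007 k m).getD j 0 * 5 [ZMOD 1000000007] := pvModSelf _
            _ ≡ (if m < j then 0 else 5^j * (pvDpA 1000000007 k (m-j)).getD 0 0) * 5
                  [ZMOD 1000000007] := (ih (by omega) m).mul_right 5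
            _ = (if m+1 < j+1 then 0 else 5^(j+1) * (pvDpA 1000000007 k (m+1-(j+1))).getD 0 0) := by
                  by_cases hm : m < j
                  · simp [hm]
                  · have h1 : ¬ (m + 1 < j + 1) := by omega
                    simp only [if_neg hm, if_neg h1, Nat.succ_sub_succ]
                    ring

-- the row-sum recurrence: sum(dp[m+1]) ≡ 26*sum(dp[m]) - 5*dp[m][k]
theorem pvSumRow (k : Nat) (m : Nat) :
    (pvDpA 1000000007 k (m+1)).sum
      ≡ 26 * (pvDpA 1000000007 k m).sum - 5 * (pvDpA 1000000007 k m).getD k 0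
        [ZMOD 1000000007] := by
  have hlen : (pvDpA 1000000007 k m).length = k + 1 := pvLenA _ _ _
  have hrow : pvDpA 1000000007 k (m+1) =
      ((pvDpA 1000000007 k m).sum % 1000000007 * 21) % 1000000007 ::
        (List.range k).map (fun j => ((pvDpA 1000000007 k m).getD j 0 * 5) % 1000000007) := by
    simp only [pvDpA, pvRowA, pvmod, List.range_succ_eq_map, List.map_cons, List.map_map]
    simp [Function.comp_def]
  rw [hrow]
  have hsplit : (pvDpA 1000000007 k m).sum
      = ((List.range k).map (fun j => (pvDpA 1000000007 k m).getD j 0)).sum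
        + (pvDpA 1000000007 k m).getD k 0 := by
    conv_lhs => rw [pvSumGetD (pvDpA 1000000007 k m)]
    rw [hlen, List.range_succ]
    simp
  have h1 : ((pvDpA 1000000007 k m).sum % 1000000007 * 21) % 1000000007
      ≡ (pvDpA 1000000007 k m).sum * 21 [ZMOD 1000000007] :=
    (pvModSelf _).trans ((pvModSelf _).mul_right 21)
  have h2 : ((List.range k).map (fun j => ((pvDpA 1000000007 k m).getD j 0 * 5) % 1000000007)).sum
      ≡ ((List.range k).map (fun j => (pvDpA 1000000007 k m).getD j 0 * 5)).sum
        [ZMOD 1000000007] :=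
    pvSumCong _ _ _ _ (fun j _ => pvModSelf _)
  have h3 : ((List.range k).map (fun j => (pvDpA 1000000007 k m).getD j 0 * 5)).sum
      = ((List.range k).map (fun j => (pvDpA 1000000007 k m).getD j 0)).sum * 5 :=
    List.sum_map_mul_right _ _ _
  simp only [List.sum_cons]
  calc ((pvDpA 1000000007 k m).sum % 1000000007 * 21) % 1000000007
        + ((List.range k).map (fun j => ((pvDpA 1000000007 k m).getD j 0 * 5) % 1000000007)).sum
      ≡ (pvDpA 1000000007 k m).sum * 21
        + ((List.range k).map (fun j => (pvDpA 1000000007 k m).getD j 0 * 5)).sum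
          [ZMOD 1000000007] := h1.add h2
    _ = 26 * (pvDpA 1000000007 k m).sum - 5 * (pvDpA 1000000007 k m).getD k 0 := by
        rw [h3]
        omega
  -- (the last step is linear arithmetic from hsplit)

-- p5 ≡ 5^k
theorem pvP5 (k : Nat) :
    PySem.Int.powMod 5 k 1000000007 ≡ 5^k [ZMOD 1000000007] := by
  rw [PySem.Int.powMod_eq_emod 5 k (by norm_num)]
  exact pvModSelf _

-- tail of B at index n over the accumulated S list is ≡ dp[n][k]
theorem pvTail (k n : Nat) :
    pvTailB 1000000007 (PySem.Int.powMod 5 k 1000000007) k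
      ((List.range (n+1)).map (pvS k)) n
      ≡ (pvDpA 1000000007 k n).getD k 0 [ZMOD 1000000007] := by
  have hcol := pvCol k k le_rfl n
  unfold pvTailB
  by_cases h1 : n < k
  · rw [if_pos h1]
    exact ((hcol.trans (by rw [if_pos h1])).symm).symm.symm
  · rw [if_neg h1]
    by_cases h2 : n = k
    · rw [if_pos h2]
      subst h2
      have hz : (pvDpA 1000000007 n (n-n)).getD 0 0 = 1 := by
        rw [Nat.sub_self]; exact pvDp0_zero n
      have he : (if n < n then (0:Int) else 5^n * (pvDpA 1000000007 n (n-n)).getD 0 0) = 5^n := by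
        rw [if_neg h1, hz, mul_one]
      exact (pvP5 n).trans ((he ▸ hcol).symm)
    · rw [if_neg h2]
      have hk : k < n := by omega
      have hidx : n - k - 1 < n + 1 := by omega
      rw [PySem.List.getD_map_range _ _ _ _ hidx]
      have hnk : n - k = (n - k - 1) + 1 := by omega
      have hdp0 : (pvDpA 1000000007 k (n-k)).getD 0 0
          = ((pvDpA 1000000007 k (n-k-1)).sum % 1000000007 * 21) % 1000000007 := by
        rw [hnk]; exact pvDp0_succ k (n-k-1)
      have hA : (pvDpA 1000000007 k n).getD k 0
          ≡ 5^k * (((pvDpA 1000000007 k (n-k-1)).sum % 1000000007 * 21) % 1000000007)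
            [ZMOD 1000000007] := by
        have := hcol.trans (by rw [if_neg (by omega : ¬ n < k)])
        rw [hdp0] at this
        exact this
      have hA2 : (pvDpA 1000000007 k n).getD k 0
          ≡ 5^k * ((pvDpA 1000000007 k (n-k-1)).sum * 21) [ZMOD 1000000007] :=
        hA.trans (Int.ModEq.mul_left _ ((pvModSelf _).trans ((pvModSelf _).mul_right 21)))
      have hB : PySem.Int.mod
            (PySem.Int.mod (PySem.Int.powMod 5 k 1000000007 * 21) 1000000007 * pvS k (n-k-1))
            1000000007
          ≡ 5^k * ((pvDpA 1000000007 k (n-k-1)).sum * 21) [ZMOD 1000000007] := by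
        simp only [pvmod, pvS]
        calc (PySem.Int.powMod 5 k 1000000007 * 21) % 1000000007
              * ((pvDpA 1000000007 k (n-k-1)).sum % 1000000007) % 1000000007
            ≡ (PySem.Int.powMod 5 k 1000000007 * 21)
              * ((pvDpA 1000000007 k (n-k-1)).sum % 1000000007) [ZMOD 1000000007] :=
              (pvModSelf _).trans ((pvModSelf _).mul_right _)
          _ ≡ (5^k * 21) * (pvDpA 1000000007 k (n-k-1)).sum [ZMOD 1000000007] :=
              Int.ModEq.mul ((pvP5 k).mul_right 21) (pvModSelf _)
          _ = 5^k * ((pvDpA 1000000007 k (n-k-1)).sum * 21) := by ring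
      exact hB.trans hA2.symm

-- the loop invariant: B's list after n iterations is [S(0), …, S(n)]
theorem pvFold (k : Nat) : ∀ n : Nat,
    (List.range n).foldl (pvStepB 1000000007 (PySem.Int.powMod 5 k 1000000007) k) [1]
      = (List.range (n+1)).map (pvS k) := by
  intro n
  induction n with
  | zero =>
      have h0 : pvS k 0 = 1 := by
        simp only [pvS, pvDpA, pvRow0, pvmod]
        simp
      simp [List.range_succ, h0]
  | succ n ih =>
      rw [List.range_succ, List.foldl_append, ih]
      have hlast : ((List.range (n+1)).map (pvS k)).getLastD 0 = pvS k n := by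
        rw [List.range_succ, List.map_append]
        exact List.getLastD_concat
      have hnew : PySem.Int.mod
          (26 * pvS k n - 5 * pvTailB 1000000007 (PySem.Int.powMod 5 k 1000000007) k
            ((List.range (n+1)).map (pvS k)) n) 1000000007 = pvS k (n+1) := by
        simp only [pvmod, pvS]
        have hmq : 26 * pvS k n - 5 * pvTailB 1000000007 (PySem.Int.powMod 5 k 1000000007) k
            ((List.range (n+1)).map (pvS k)) n
            ≡ (pvDpA 1000000007 k (n+1)).sum [ZMOD 1000000007] := by
          have hS : pvS k n ≡ (pvDpA 1000000007 k n).sum [ZMOD 1000000007] := by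
            simp only [pvS, pvmod]; exact pvModSelf _
          have := Int.ModEq.sub (hS.mul_left 26) ((pvTail k n).mul_left 5)
          exact this.trans (pvSumRow k n).symm
        simpa only [pvS, pvmod] using hmq
      simp only [List.foldl_cons, List.foldl_nil, pvStepB, hlast, hnew]
      rw [List.range_succ (n := n+1), List.map_append]
      simp

-- ===== VERDICT (by name: the statement is the Claim_ definition above) =====
theorem kvowelwords_spec : Claim_equal_kvowelwords := by
  intro N K _ _
  show kvowelwords N K = kvowelwords_alt N K
  unfold kvowelwords kvowelwords_alt
  rw [pvFold K.toNat N.toNat]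
  rw [PySem.List.getD_map_range _ _ _ _ (by omega)]
  rfl
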